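-- pv_equiv track=rewrite | github.com/bavalpey/codefights | core/waterfallOfIntegration/gravitation.py | gravitation
-- ===== SOURCE A (Python) =====
-- def gravitation(rows):
--   col_score = [0]*(len(rows[0]))
--   mn = float("INF")
--   mnIdx = []
--   for j,item in enumerate(zip(*rows)):
--     seenHash = False
--     cntr = 0
--     for i,sym in enumerate(item):
--       if seenHash:
--         if sym == '#':
--           col_score[j] += cntr
--           cntr = 0
--         else:
--           cntr += 1
--       else:
--         if sym == '#':
--           seenHash = True
--     if cntr:
--       col_score[j] += cntr
--     if col_score[j] < mn:
--       mnIdx=[j]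
--       mn = col_score[j]
--     elif col_score[j] == mn:
--       mnIdx.append(j)
--
--   return mnIdx
-- ===== SOURCE B (Python) =====
-- def gravitation(rows):
--     cols = list(zip(*rows))
--     if not cols:
--         return []
--     scores = []
--     for col in cols:
--         col = list(col)
--         if '#' not in col:
--             scores.append(0)
--         else:
--             below = col[col.index('#') + 1:]
--             scores.append(len(below) - below.count('#'))
--     mn = min(scores)
--     return [j for j, v in enumerate(scores) if v == mn]
-- ===== Notes on version B (the rewrite author's own statement) =====
-- stated objective: simpler
-- what changed: B replaces A's stateful per-column scan (seenHash/cntr flags mutating a pre-allocated score array) and interleaved running-min/index bookkeeping by a direct arithmetic score per column (cells below the first '#' minus the '#'s among them, via index/slice/count) collected into a list, followed by a separate min() and an index-filter pass.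
-- outside the precondition, e.g. on gravitation([]): A raises IndexError, B returns []
import Mathlib
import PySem

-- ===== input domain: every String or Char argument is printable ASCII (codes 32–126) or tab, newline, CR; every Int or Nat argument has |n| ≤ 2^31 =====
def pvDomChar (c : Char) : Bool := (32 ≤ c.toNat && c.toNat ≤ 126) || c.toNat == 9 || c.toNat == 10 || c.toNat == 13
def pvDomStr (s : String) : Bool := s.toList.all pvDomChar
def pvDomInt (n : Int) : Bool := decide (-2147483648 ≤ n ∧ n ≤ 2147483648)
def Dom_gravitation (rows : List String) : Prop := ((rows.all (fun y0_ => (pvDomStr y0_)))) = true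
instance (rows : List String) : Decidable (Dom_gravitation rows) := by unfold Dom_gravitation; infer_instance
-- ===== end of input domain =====

-- B computes each column's score arithmetically (cells below the first '#', minus the '#'s
-- among them) into a list and selects the minimal indices in a separate pass, instead of A's
-- stateful seenHash/cntr scan into a pre-allocated array with interleaved running-min updates.

-- zip(*rows): shared helper, the truncating transpose of Python's zip of the rows.
def zipStar (rows : List (List Char)) : List (List Char) :=
  if h : rows = [] ∨ rows.any (·.isEmpty) then []
  else (rows.map (fun r => r.headD ' ')) :: zipStar (rows.map (fun r => r.tail))
termination_by (rows.headD []).length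
decreasing_by
  rcases rows with _ | ⟨r, rs⟩
  · simp at h
  · push_neg at h
    have hr : ¬ r.isEmpty := by
      have := h.2
      simp [List.any_cons] at this
      exact by simpa using this.1
    rcases r with _ | ⟨c, cr⟩
    · simp at hr
    · simp

-- ===== PORT A =====
-- inner loop body of A (state: seenHash, cntr, col_score)
def gravStep (j : Int) (st : Bool × Int × List Int) (sym : Char) : Bool × Int × List Int :=
  let (seenHash, cntr, cs) := st
  if seenHash then
    if sym = '#' then (true, 0, cs.set j.toNat (cs.getD j.toNat 0 + cntr))
    else (true, cntr + 1, cs)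
  else
    if sym = '#' then (true, cntr, cs)
    else (false, cntr, cs)

-- outer loop body of A ('col_score[j] += cntr' and the reads of col_score[j] are ported with
-- set/getD; under Pre_ the index j is always in range, as in the Python)
def gravOuter (acc : List Int × Option Int × List Int) (jp : Int × List Char) :
    List Int × Option Int × List Int :=
  let (cs, mn, mnIdx) := acc
  let (j, item) := jp
  let r := item.foldl (gravStep j) (false, 0, cs)
  let cs := if r.2.1 ≠ 0 then r.2.2.set j.toNat (r.2.2.getD j.toNat 0 + r.2.1) else r.2.2
  let v := cs.getD j.toNat 0
  match mn with
  | none => (cs, some v, [j])           -- anything < float("INF")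
  | some m =>
    if v < m then (cs, some v, [j])
    else if v = m then (cs, mn, mnIdx ++ [j])
    else (cs, mn, mnIdx)

def gravitation (rows : List String) : List Int :=
  let colScore : List Int := List.replicate (rows.headD "").toList.length 0
  let cols := zipStar (rows.map (fun s => s.toList))
  ((PySem.List.enumerate cols).foldl gravOuter (colScore, none, [])).2.2

-- ===== PORT B =====
-- B's per-column score: 0 if no '#', else the cells strictly below the first '#'
-- minus the '#'s among them
def colScoreB (col : List Char) : Int :=
  if '#' ∈ col then
    match PySem.List.index? col '#' with
    | some i =>
      let below := PySem.List.slice col (some ((i : Int) + 1)) none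
      (below.length : Int) - (PySem.List.count below '#' : Int)
    | none => 0   -- unreachable: guarded by the membership test
  else 0

def gravitation_alt (rows : List String) : List Int :=
  let cols := zipStar (rows.map (fun s => s.toList))
  if cols.isEmpty then []
  else
    let scores := cols.foldl (fun acc col => acc ++ [colScoreB col]) []
    match PySem.List.min? scores (fun v => v) with
    | none => []
    | some mn =>
      (PySem.List.enumerate scores).foldl
        (fun acc p => if p.2 = mn then acc ++ [p.1] else acc) []

-- ===== PRECONDITION & SPEC =====
-- Pre_ excludes only rows = [], on which A raises IndexError (rows[0]).
def Pre_gravitation (rows : List String) : Prop := rows ≠ []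
instance (rows : List String) : Decidable (Pre_gravitation rows) := by
  unfold Pre_gravitation; infer_instance

def pvWitness_gravitation : List String := ["#.", ".#", ".."]

def Spec_gravitation (rows : List String) (out : List Int) : Prop := out = gravitation_alt rows
instance (rows : List String) (out : List Int) : Decidable (Spec_gravitation rows out) := by
  unfold Spec_gravitation; infer_instance

-- ===== CLAIM (what is proved, stated in full; the proofs are below) =====
def Claim_equal_gravitation : Prop :=
  ∀ (rows : List String), Dom_gravitation rows → Pre_gravitation rows →
    Spec_gravitation rows (gravitation rows)

-- ===== LEMMAS AND PROOFS =====

-- number of non-'#' cells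
def nonHash (l : List Char) : Int := (l.countP (fun x => x != '#') : Int)

-- A's inner fold followed by the final 'if cntr: col_score[j] += cntr' flush
def flushed (j : Int) (cs : List Int) (item : List Char) (seen : Bool) (c : Int) : List Int :=
  let r := item.foldl (gravStep j) (seen, c, cs)
  if r.2.1 ≠ 0 then r.2.2.set j.toNat (r.2.2.getD j.toNat 0 + r.2.1) else r.2.2

-- indices (from j) of the entries of scores equal to M
def selIdx : List Int → Int → Int → List Int
  | [], _, _ => []
  | v :: rest, j, M => if v = M then j :: selIdx rest (j + 1) M else selIdx rest (j + 1) M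

-- functional description of A's running-min/index bookkeeping
def runMin : List Int → Int → Option Int → List Int → List Int
  | [], _, _, idx => idx
  | v :: rest, j, none, _ => runMin rest (j + 1) (some v) [j]
  | v :: rest, j, some m, idx =>
    if v < m then runMin rest (j + 1) (some v) [j]
    else if v = m then runMin rest (j + 1) (some m) (idx ++ [j])
    else runMin rest (j + 1) (some m) idx

theorem getD_set_ne (cs : List Int) (n k : Nat) (a : Int) (h : k ≠ n) :
    (cs.set n a).getD k 0 = cs.getD k 0 := by
  simp [List.getD_eq_getElem?_getD, List.getElem?_set_ne (Ne.symm h)]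

theorem getD_set_self (cs : List Int) (n : Nat) (a : Int) (h : n < cs.length) :
    (cs.set n a).getD n 0 = a := by
  simp [List.getD_eq_getElem?_getD, List.getElem?_set_self, h]

theorem nonHash_nil : nonHash [] = 0 := rfl

theorem nonHash_cons (x : Char) (l : List Char) :
    nonHash (x :: l) = (if x = '#' then 0 else 1) + nonHash l := by
  by_cases hx : x = '#' <;> simp [nonHash, List.countP_cons, hx] <;> push_cast <;> ring

theorem nonHash_eq (l : List Char) : nonHash l = (l.length : Int) - (l.count '#' : Int) := by
  induction l with
  | nil => simp [nonHash_nil]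
  | cons x t ih =>
    rw [nonHash_cons, ih, List.count_cons]
    by_cases hx : x = '#' <;> simp [hx] <;> push_cast <;> ring

theorem flushed_seen_cons_hash (rest : List Char) (c : Int) (cs : List Int) (j : Int) :
    flushed j cs ('#' :: rest) true c
      = flushed j (cs.set j.toNat (cs.getD j.toNat 0 + c)) rest true 0 := by
  simp [flushed, gravStep]

theorem flushed_seen_cons_ne (x : Char) (rest : List Char) (c : Int) (cs : List Int) (j : Int)
    (hx : x ≠ '#') : flushed j cs (x :: rest) true c = flushed j cs rest true (c + 1) := by
  simp [flushed, gravStep, hx]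

theorem flushed_unseen_cons_hash (rest : List Char) (cs : List Int) (j : Int) :
    flushed j cs ('#' :: rest) false 0 = flushed j cs rest true 0 := by
  simp [flushed, gravStep]

theorem flushed_unseen_cons_ne (x : Char) (rest : List Char) (cs : List Int) (j : Int)
    (hx : x ≠ '#') : flushed j cs (x :: rest) false 0 = flushed j cs rest false 0 := by
  simp [flushed, gravStep, hx]

theorem colScoreB_nil : colScoreB [] = 0 := by simp [colScoreB]

theorem colScoreB_cons_hash (rest : List Char) : colScoreB ('#' :: rest) = nonHash rest := by
  rw [colScoreB, if_pos (List.mem_cons_self), PySem.List.index?_cons_self]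
  show ((PySem.List.slice ('#' :: rest) (some ((0 : Nat) + 1)) none).length : Int) - _ = _
  norm_num [PySem.List.slice_from_one, PySem.List.count_eq, nonHash_eq]

theorem colScoreB_cons_ne (x : Char) (rest : List Char) (hx : x ≠ '#') :
    colScoreB (x :: rest) = colScoreB rest := by
  by_cases hm : '#' ∈ rest
  · have hmem : '#' ∈ x :: rest := List.mem_cons_of_mem _ hm
    rcases Option.isSome_iff_exists.mp ((PySem.List.index?_isSome_iff rest '#').mpr hm)
      with ⟨i, hi⟩
    rw [colScoreB, if_pos hmem, PySem.List.index?_cons_of_ne rest hx, hi,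
      colScoreB, if_pos hm, hi]
    have h1 : ((i + 1 : Nat) : Int) + 1 = ((i + 2 : Nat) : Int) := by push_cast; ring
    have h2 : ((i : Nat) : Int) + 1 = ((i + 1 : Nat) : Int) := by push_cast; ring
    simp only [Option.map_some, h1, h2, PySem.List.slice_from_natCast]
    have : List.drop (i + 2) (x :: rest) = List.drop (i + 1) rest := rfl
    rw [this]
  · have hmem : '#' ∉ x :: rest := by
      intro h; rcases List.mem_cons.mp h with h | h
      · exact hx h.symm
      · exact hm h
    rw [colScoreB, if_neg hmem, colScoreB, if_neg hm]

theorem flushed_seen (item : List Char) : ∀ (c : Int) (cs : List Int) (j : Int),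
    (flushed j cs item true c).length = cs.length ∧
    (∀ k, k ≠ j.toNat → (flushed j cs item true c).getD k 0 = cs.getD k 0) ∧
    (j.toNat < cs.length →
      (flushed j cs item true c).getD j.toNat 0 = cs.getD j.toNat 0 + (c + nonHash item)) := by
  induction item with
  | nil =>
    intro c cs j
    by_cases hc : c = 0
    · simp [flushed, hc, nonHash_nil]
    · have hred : flushed j cs [] true c = cs.set j.toNat (cs.getD j.toNat 0 + c) := by
        simp [flushed, hc]
      refine ⟨by rw [hred, List.length_set], fun k hk => ?_, fun hj => ?_⟩
      · rw [hred]; exact getD_set_ne _ _ _ _ hk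
      · rw [hred, getD_set_self _ _ _ hj, nonHash_nil]; ring
  | cons x rest ih =>
    intro c cs j
    by_cases hx : x = '#'
    · subst hx
      rw [flushed_seen_cons_hash]
      set cs' := cs.set j.toNat (cs.getD j.toNat 0 + c) with hcs'
      obtain ⟨hl, hne, hj⟩ := ih 0 cs' j
      refine ⟨by rw [hl, hcs', List.length_set], fun k hk => ?_, fun hjlt => ?_⟩
      · rw [hne k hk, hcs', getD_set_ne _ _ _ _ hk]
      · rw [hj (by rw [hcs', List.length_set]; exact hjlt), hcs',
          getD_set_self _ _ _ hjlt, nonHash_cons]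
        simp; ring
    · rw [flushed_seen_cons_ne _ _ _ _ _ hx]
      obtain ⟨hl, hne, hj⟩ := ih (c + 1) cs j
      refine ⟨hl, hne, fun hjlt => ?_⟩
      rw [hj hjlt, nonHash_cons, if_neg hx]; ring

theorem flushed_unseen (item : List Char) : ∀ (cs : List Int) (j : Int),
    (flushed j cs item false 0).length = cs.length ∧
    (∀ k, k ≠ j.toNat → (flushed j cs item false 0).getD k 0 = cs.getD k 0) ∧
    (j.toNat < cs.length →
      (flushed j cs item false 0).getD j.toNat 0 = cs.getD j.toNat 0 + colScoreB item) := by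
  induction item with
  | nil => intro cs j; simp [flushed, colScoreB_nil]
  | cons x rest ih =>
    intro cs j
    by_cases hx : x = '#'
    · subst hx
      rw [flushed_unseen_cons_hash]
      obtain ⟨hl, hne, hj⟩ := flushed_seen rest 0 cs j
      exact ⟨hl, hne, fun hjlt => by rw [hj hjlt, colScoreB_cons_hash]; ring⟩
    · rw [flushed_unseen_cons_ne _ _ _ _ hx]
      obtain ⟨hl, hne, hj⟩ := ih cs j
      exact ⟨hl, hne, fun hjlt => by rw [hj hjlt, colScoreB_cons_ne _ _ hx]⟩

theorem gravOuter_eq (cs : List Int) (mn : Option Int) (idx : List Int) (j : Int)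
    (item : List Char) : gravOuter (cs, mn, idx) (j, item) =
    (match mn with
     | none => (flushed j cs item false 0, some ((flushed j cs item false 0).getD j.toNat 0),
         [j])
     | some m =>
       if (flushed j cs item false 0).getD j.toNat 0 < m then
         (flushed j cs item false 0, some ((flushed j cs item false 0).getD j.toNat 0), [j])
       else if (flushed j cs item false 0).getD j.toNat 0 = m then
         (flushed j cs item false 0, mn, idx ++ [j])
       else (flushed j cs item false 0, mn, idx)) := rfl

theorem outerA (cols : List (List Char)) : ∀ (j : Nat) (cs : List Int) (mn : Option Int)
    (idx : List Int), (∀ k, j ≤ k → cs.getD k 0 = 0) → j + cols.length ≤ cs.length →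
    ((PySem.List.enumerate cols (j : Int)).foldl gravOuter (cs, mn, idx)).2.2
      = runMin (cols.map colScoreB) (j : Int) mn idx := by
  induction cols with
  | nil => intro j cs mn idx _ _; simp [PySem.List.enumerate_nil, runMin]
  | cons item cols ih =>
    intro j cs mn idx hcs hlen
    rw [PySem.List.enumerate_cons, List.foldl_cons, gravOuter_eq]
    obtain ⟨hl, hne, hj⟩ := flushed_unseen item cs (j : Int)
    have hjn : ((j : Int)).toNat = j := Int.toNat_natCast j
    have hjlt : ((j : Int)).toNat < cs.length := by rw [hjn]; simp at hlen; omega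
    have hv : (flushed (j : Int) cs item false 0).getD ((j : Int)).toNat 0 = colScoreB item := by
      rw [hj hjlt, hjn, hcs j le_rfl, zero_add]
    set cs' := flushed (j : Int) cs item false 0 with hcsdef
    have hcs' : ∀ k, j + 1 ≤ k → cs'.getD k 0 = 0 := by
      intro k hk
      rw [hne k (by omega), hcs k (by omega)]
    have hlen' : (j + 1) + cols.length ≤ cs'.length := by
      rw [hl]; simp at hlen ⊢; omega
    have hcast : ((j : Int)) + 1 = ((j + 1 : Nat) : Int) := by push_cast; ring
    cases mn with
    | none =>
      simp only [List.map_cons, runMin, hv, hcast]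
      exact ih (j + 1) cs' (some (colScoreB item)) [(j : Int)] hcs' hlen'
    | some m =>
      simp only [List.map_cons, runMin, hv, hcast]
      by_cases h1 : colScoreB item < m
      · simp only [if_pos h1]
        exact ih (j + 1) cs' (some (colScoreB item)) [(j : Int)] hcs' hlen'
      · by_cases h2 : colScoreB item = m
        · simp only [if_neg h1, if_pos h2]
          exact ih (j + 1) cs' (some m) (idx ++ [(j : Int)]) hcs' hlen'
        · simp only [if_neg h1, if_neg h2]
          exact ih (j + 1) cs' (some m) idx hcs' hlen'

theorem zipStar_length (rs : List (List Char)) (h : rs ≠ []) :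
    (zipStar rs).length ≤ (rs.headD []).length := by
  fun_induction zipStar rs with
  | case1 rs hc => simp
  | case2 rs hc ih =>
    rcases rs with _ | ⟨r, rt⟩
    · simp at hc
    · have hr : r ≠ [] := by
        intro hre
        exact hc (Or.inr (by simp [hre]))
      have ihm := ih (by simp)
      rcases r with _ | ⟨c, cr⟩
      · exact absurd rfl hr
      · simpa using ihm

theorem runMin_some (scores : List Int) : ∀ (j m : Int) (idx : List Int),
    runMin scores j (some m) idx =
      if scores.foldl min m < m then selIdx scores j (scores.foldl min m)
      else idx ++ selIdx scores j m := by
  induction scores with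
  | nil => intro j m idx; simp [runMin, selIdx]
  | cons v rest ih =>
    intro j m idx
    have hMle := (PySem.List.foldl_min_le rest (min m v)).1
    by_cases h1 : v < m
    · have hmv : min m v = v := by omega
      rw [List.foldl_cons, hmv]
      have hle : rest.foldl min v ≤ v := by
        have := (PySem.List.foldl_min_le rest v).1; exact this
      rw [show runMin (v :: rest) j (some m) idx = runMin rest (j + 1) (some v) [j] from by
        simp [runMin, h1], ih]
      by_cases h2 : rest.foldl min v < v
      · rw [if_pos h2, if_pos (by omega), selIdx, if_neg (by omega)]
      · have hveq : rest.foldl min v = v := le_antisymm hle (by omega)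
        rw [if_neg h2, if_pos (by omega), hveq, selIdx, if_pos rfl]
        rfl
    · have hmv : min m v = m := by omega
      rw [List.foldl_cons, hmv]
      rw [hmv] at hMle
      by_cases h2 : v = m
      · rw [show runMin (v :: rest) j (some m) idx
            = runMin rest (j + 1) (some m) (idx ++ [j]) from by simp [runMin, h1, h2], ih]
        by_cases h3 : rest.foldl min m < m
        · rw [if_pos h3, if_pos h3, selIdx, if_neg (by omega)]
        · rw [if_neg h3, if_neg h3, selIdx, if_pos h2, List.append_assoc]
          rfl
      · rw [show runMin (v :: rest) j (some m) idx = runMin rest (j + 1) (some m) idx from by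
          simp [runMin, h1, h2], ih]
        have hvm : m < v := by omega
        by_cases h3 : rest.foldl min m < m
        · rw [if_pos h3, if_pos h3, selIdx, if_neg (by omega)]
        · rw [if_neg h3, if_neg h3, selIdx, if_neg (by omega)]

theorem foldl_sel (scores : List Int) : ∀ (j : Int) (acc : List Int) (M : Int),
    (PySem.List.enumerate scores j).foldl
        (fun acc p => if p.2 = M then acc ++ [p.1] else acc) acc
      = acc ++ selIdx scores j M := by
  induction scores with
  | nil => intro j acc M; simp [PySem.List.enumerate_nil, selIdx]
  | cons v rest ih =>
    intro j acc M
    rw [PySem.List.enumerate_cons, List.foldl_cons]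
    by_cases hv : v = M
    · simp [hv, ih, selIdx]
    · simp only [if_neg (by simpa using hv), ih, selIdx]

theorem replicate_getD (n k : Nat) : (List.replicate n (0 : Int)).getD k 0 = 0 := by
  rw [List.getD_eq_getElem?_getD, List.getElem?_replicate]
  split <;> rfl

-- ===== VERDICT (by name: the statement is the Claim_ definition above) =====
theorem gravitation_spec : Claim_equal_gravitation := by
  intro rows _ hpre
  rcases rows with _ | ⟨r, rt⟩
  · exact absurd rfl hpre
  unfold Spec_gravitation
  have hA : gravitation (r :: rt)
      = runMin ((zipStar ((r :: rt).map (fun s => s.toList))).map colScoreB) 0 none [] := by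
    have hlenle := zipStar_length ((r :: rt).map (fun s => s.toList)) (by simp)
    have h0 := outerA (zipStar ((r :: rt).map (fun s => s.toList))) 0
      (List.replicate r.toList.length 0) none []
      (fun k _ => replicate_getD _ _) (by simpa using hlenle)
    simpa [gravitation] using h0
  rw [hA]
  cases hzc : zipStar ((r :: rt).map (fun s => s.toList)) with
  | nil =>
    simp only [gravitation_alt]
    rw [hzc]
    simp [runMin]
  | cons c0 ct =>
    have hsc : (c0 :: ct).foldl (fun acc col => acc ++ [colScoreB col]) ([] : List Int)
        = colScoreB c0 :: ct.map colScoreB := by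
      rw [PySem.List.foldl_append_singleton_eq_map]; rfl
    have hmin := PySem.List.min?_id_cons (colScoreB c0) (ct.map colScoreB)
    have hM := (PySem.List.foldl_min_le (ct.map colScoreB) (colScoreB c0)).1
    have hBval : gravitation_alt (r :: rt)
        = selIdx (colScoreB c0 :: ct.map colScoreB) 0
            ((ct.map colScoreB).foldl min (colScoreB c0)) := by
      simp only [gravitation_alt, hzc, List.isEmpty_cons, hsc, hmin,
        Bool.false_eq_true, if_false]
      rw [foldl_sel]
      simp
    rw [hBval]
    have hrm : runMin (colScoreB c0 :: ct.map colScoreB) 0 none []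
        = runMin (ct.map colScoreB) 1 (some (colScoreB c0)) [0] := by
      simp [runMin]
    rw [List.map_cons, hrm, runMin_some]
    by_cases hlt : (ct.map colScoreB).foldl min (colScoreB c0) < colScoreB c0
    · rw [if_pos hlt, selIdx, if_neg (by omega)]
      norm_num
    · have heq : (ct.map colScoreB).foldl min (colScoreB c0) = colScoreB c0 := by omega
      rw [if_neg hlt, heq, selIdx, if_pos rfl]
      rfl
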